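-- pv_equiv track=rewrite | github.com/rezwana-tasnin/python | src/largest.py | getLargestOfTupleOdd
-- ===== SOURCE A (Python) =====
-- def getLargestOfTupleOdd(tuple):
--     if(len(tuple)==0):
--         return None
--     l = None
--     if(tuple[0] % 2 == 1):
--         l = tuple[0]
--     for i in tuple:
--         if(i % 2 == 1):
--             if(l == None or i > l):
--                 l = i
--     return l
-- ===== SOURCE B (Python) =====
-- def getLargestOfTupleOdd(tuple):
--     for i in sorted(tuple, reverse=True):
--         if i % 2 == 1:
--             return i
--     return None
-- ===== Notes on version B (the rewrite author's own statement) =====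
-- stated objective: alternative
-- what changed: Replaced A's single-pass running-max loop with a None sentinel by sort-then-scan: sort the tuple in descending order and return the first odd element encountered (None if the scan finds none).
import Mathlib
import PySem

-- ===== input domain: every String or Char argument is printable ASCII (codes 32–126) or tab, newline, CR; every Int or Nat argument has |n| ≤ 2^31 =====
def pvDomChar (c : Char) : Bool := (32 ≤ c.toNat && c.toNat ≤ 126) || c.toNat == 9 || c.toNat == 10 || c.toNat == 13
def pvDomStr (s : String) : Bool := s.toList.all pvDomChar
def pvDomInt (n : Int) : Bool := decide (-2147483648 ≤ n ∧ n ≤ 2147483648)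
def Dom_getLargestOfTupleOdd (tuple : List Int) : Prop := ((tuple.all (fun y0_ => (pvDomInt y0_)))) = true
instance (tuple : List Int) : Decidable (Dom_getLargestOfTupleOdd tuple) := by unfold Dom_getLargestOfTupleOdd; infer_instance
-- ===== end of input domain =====

-- B replaces A's single-pass running-max loop by sort-then-scan: sort descending,
-- return the first odd element (the max odd = first odd in descending order);
-- objective: alternative — O(n log n) instead of O(n), but a genuinely different strategy.

-- ===== PORT A =====
-- A's loop body: if i % 2 == 1 and (l is None or i > l) then l = i
def pvStepA (l : Option Int) (i : Int) : Option Int :=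
  if PySem.Int.mod i 2 = 1 then
    match l with
    | none => some i
    | some v => if i > v then some i else some v
  else l

def getLargestOfTupleOdd (tuple : List Int) : Option Int :=
  match tuple with
  | [] => none                                  -- if len(tuple)==0: return None
  | t0 :: _ =>
    let l : Option Int := if PySem.Int.mod t0 2 = 1 then some t0 else none
    tuple.foldl pvStepA l                       -- for i in tuple: …

-- ===== PORT B =====
-- for i in sorted(tuple, reverse=True): if i % 2 == 1: return i  — early return = find?
def getLargestOfTupleOdd_alt (tuple : List Int) : Option Int :=
  (PySem.List.sorted tuple (fun x => x) true).find?
    (fun i => decide (PySem.Int.mod i 2 = 1))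

-- ===== PRECONDITION & SPEC =====
def Spec_getLargestOfTupleOdd (tuple : List Int) (out : Option Int) : Prop := out = getLargestOfTupleOdd_alt tuple
instance (tuple : List Int) (out : Option Int) : Decidable (Spec_getLargestOfTupleOdd tuple out) := by unfold Spec_getLargestOfTupleOdd; infer_instance

-- ===== CLAIM (what is proved, stated in full; the proofs are below) =====
def Claim_equal_getLargestOfTupleOdd : Prop := ∀ (tuple : List Int), Dom_getLargestOfTupleOdd tuple → Spec_getLargestOfTupleOdd tuple (getLargestOfTupleOdd tuple)

-- ===== LEMMAS AND PROOFS =====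

lemma pvMod2 (x : Int) : PySem.Int.mod x 2 = x % 2 :=
  PySem.Int.mod_eq_emod_of_pos (by norm_num)

lemma pvFold_some (xs : List Int) : ∀ (v : Int),
    xs.foldl pvStepA (some v)
      = some ((xs.filter (fun i => decide (i % 2 = 1))).foldl max v) := by
  induction xs with
  | nil => intro v; simp
  | cons x t ih =>
    intro v
    by_cases hx : x % 2 = 1
    · simp only [List.foldl_cons, List.filter_cons, pvStepA, pvMod2, hx,
        decide_true, if_true]
      by_cases h : v < x
      · rw [if_pos h, ih, max_eq_right h.le]
      · rw [if_neg h, ih, max_eq_left (not_lt.mp h)]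
    · simp only [List.foldl_cons, List.filter_cons, pvStepA, pvMod2, hx,
        decide_false, Bool.false_eq_true, if_false, ih]

lemma pvFold_none (xs : List Int) :
    xs.foldl pvStepA none = (xs.filter (fun i => decide (i % 2 = 1))).max? := by
  induction xs with
  | nil => simp
  | cons x t ih =>
    by_cases hx : x % 2 = 1
    · simp only [List.foldl_cons, List.filter_cons, pvStepA, pvMod2, hx,
        decide_true, if_true]
      rw [pvFold_some t x]; rfl
    · simp only [List.foldl_cons, List.filter_cons, pvStepA, pvMod2, hx,
        decide_false, Bool.false_eq_true, if_false, ih]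

-- A computes the maximum of the odd elements (none if there are none)
lemma pvA_eq_max (tuple : List Int) :
    getLargestOfTupleOdd tuple = (tuple.filter (fun i => decide (i % 2 = 1))).max? := by
  unfold getLargestOfTupleOdd
  match tuple with
  | [] => simp
  | t0 :: rest =>
    by_cases h0 : t0 % 2 = 1
    · have hstep : pvStepA (some t0) t0 = some t0 := by simp [pvStepA, h0]
      simp only [pvMod2, h0, decide_true, if_true, List.foldl_cons,
        List.filter_cons, hstep, pvFold_some]
      rfl
    · have hstep : pvStepA none t0 = none := by simp [pvStepA, h0]
      simp only [pvMod2, h0, decide_false, Bool.false_eq_true, if_false,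
        List.foldl_cons, List.filter_cons, hstep, pvFold_none]

-- early-return scan = head of the filtered list
lemma pvFind_eq_head (p : Int → Bool) (l : List Int) :
    l.find? p = (l.filter p).head? := by
  induction l with
  | nil => simp
  | cons x t ih =>
    rw [List.find?_cons, List.filter_cons]
    cases h : p x
    · rw [if_neg (by simp), ih]
    · simp only [if_pos trivial, List.head?_cons]

-- the head of a descending list is its maximum
lemma pvHead_eq_max (l : List Int) (h : l.Pairwise (fun a b => b ≤ a)) :
    l.head? = l.max? := by
  cases l with
  | nil => rfl
  | cons a t =>
    symm
    rw [List.head?_cons, List.max?_eq_some_iff]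
    refine ⟨List.mem_cons_self, ?_⟩
    intro b hb
    rcases List.mem_cons.mp hb with rfl | hb
    · exact le_refl _
    · exact (List.pairwise_cons.mp h).1 b hb

-- max? is invariant under permutation
lemma pvPerm_max (l m : List Int) (h : l.Perm m) : l.max? = m.max? := by
  cases hm : m.max? with
  | none =>
    rw [List.max?_eq_none_iff] at hm ⊢
    subst hm
    exact h.eq_nil
  | some a =>
    rw [List.max?_eq_some_iff] at hm ⊢
    exact ⟨h.mem_iff.mpr hm.1, fun b hb => hm.2 b (h.mem_iff.mp hb)⟩

-- ===== VERDICT (by name: the statement is the Claim_ definition above) =====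
theorem getLargestOfTupleOdd_spec : Claim_equal_getLargestOfTupleOdd := by
  unfold Claim_equal_getLargestOfTupleOdd
  intro tuple _
  unfold Spec_getLargestOfTupleOdd getLargestOfTupleOdd_alt
  set p : Int → Bool := fun i => decide (i % 2 = 1) with hp
  have hpred : (fun i => decide (PySem.Int.mod i 2 = 1)) = p := by
    funext i; rw [pvMod2]
  set s := PySem.List.sorted tuple (fun x => x) true with hs
  have hsp : (s.filter p).Perm (tuple.filter p) :=
    (PySem.List.sorted_perm tuple (fun x => x) true).filter p
  have hpair : s.Pairwise (fun a b => b ≤ a) :=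
    PySem.List.sorted_pairwise_rev tuple (fun x => x)
  rw [pvA_eq_max, hpred, pvFind_eq_head, pvHead_eq_max _ (hpair.filter p),
    pvPerm_max _ _ hsp]
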